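-- pv_equiv track=rewrite | github.com/sstrg/practic | practic/15/1.py | is_min_heap
-- ===== SOURCE A (Python) =====
-- def is_min_heap(heap):
--     n = len(heap)
--     for i in range(n):
--         left = 2 * i + 1
--         right = 2 * i + 2
--         if left < n and heap[i] > heap[left]:
--             return False
--         if right < n and heap[i] > heap[right]:
--             return False
--     return True
-- ===== SOURCE B (Python) =====
-- def is_min_heap(heap):
--     # Bottom-up DP: m[i] becomes the minimum of the subtree rooted at i.
--     # heap is a min-heap iff every node equals its own subtree minimum, i.e. m == heap.
--     n = len(heap)
--     m = list(heap)
--     for i in range(n - 1, -1, -1):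
--         for c in (2 * i + 1, 2 * i + 2):
--             if c < n and m[c] < m[i]:
--                 m[i] = m[c]
--     return m == heap
-- ===== Notes on version B (the rewrite author's own statement) =====
-- stated objective: alternative
-- what changed: B replaces A's local parent-vs-child checks with a bottom-up dynamic program that computes, back-to-front, the minimum of every subtree into an auxiliary array and declares the array a min-heap iff that subtree-minimum closure leaves it unchanged (m == heap).
import Mathlib
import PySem

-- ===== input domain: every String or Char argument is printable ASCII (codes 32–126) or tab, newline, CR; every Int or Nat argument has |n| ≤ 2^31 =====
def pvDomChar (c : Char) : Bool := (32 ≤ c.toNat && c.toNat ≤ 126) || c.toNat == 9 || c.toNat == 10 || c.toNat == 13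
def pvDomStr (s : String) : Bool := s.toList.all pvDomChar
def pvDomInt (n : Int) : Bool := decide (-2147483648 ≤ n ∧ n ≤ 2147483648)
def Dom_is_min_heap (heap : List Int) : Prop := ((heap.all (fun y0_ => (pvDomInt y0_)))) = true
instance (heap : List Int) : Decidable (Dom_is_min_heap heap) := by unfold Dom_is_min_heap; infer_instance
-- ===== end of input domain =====

-- B replaces A's per-parent child comparisons by a bottom-up dynamic program: it folds
-- subtree minima into an auxiliary array back-to-front and tests m == heap (objective: alternative).

-- ===== PORT A =====
-- loop over i ∈ range(n), early return False on a violated child; indices read are always in range, default 0 unused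
def isMinHeapLoopA (heap : List Int) (n : Int) : List Int → Bool
  | [] => true
  | i :: rest =>
    let left := 2 * i + 1
    let right := 2 * i + 2
    if left < n ∧ PySem.List.pyGetD heap i 0 > PySem.List.pyGetD heap left 0 then false
    else if right < n ∧ PySem.List.pyGetD heap i 0 > PySem.List.pyGetD heap right 0 then false
    else isMinHeapLoopA heap n rest

def is_min_heap (heap : List Int) : Bool :=
  let n : Int := heap.length
  isMinHeapLoopA heap n (PySem.List.pyRange 0 n 1)

-- ===== PORT B =====
-- inner 'for c in (2*i+1, 2*i+2)' body: conditional in-place update m[i] = m[c]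
def bInner (n : Int) (i : Int) (m : List Int) (c : Int) : List Int :=
  if c < n ∧ PySem.List.pyGetD m c 0 < PySem.List.pyGetD m i 0 then
    PySem.List.pySetD m i (PySem.List.pyGetD m c 0)
  else m

-- outer 'for i in range(n-1, -1, -1)' loop carrying the array m
def bLoop (n : Int) : List Int → List Int → List Int
  | m, [] => m
  | m, i :: rest => bLoop n ([2 * i + 1, 2 * i + 2].foldl (bInner n i) m) rest

def is_min_heap_alt (heap : List Int) : Bool :=
  let n : Int := heap.length
  let m := heap
  bLoop n m (PySem.List.pyRange (n - 1) (-1) (-1)) == heap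

-- ===== PRECONDITION & SPEC =====
def Spec_is_min_heap (heap : List Int) (out : Bool) : Prop := out = is_min_heap_alt heap
instance (heap : List Int) (out : Bool) : Decidable (Spec_is_min_heap heap out) := by unfold Spec_is_min_heap; infer_instance

-- ===== CLAIM (what is proved, stated in full; the proofs are below) =====
def Claim_equal_is_min_heap : Prop := ∀ (heap : List Int), Dom_is_min_heap heap → Spec_is_min_heap heap (is_min_heap heap)

-- ===== LEMMAS AND PROOFS =====

-- the minimum of the subtree of the implicit heap tree rooted at index i
def sm (heap : List Int) (i : Nat) : Int :=
  let h := PySem.List.pyGetD heap (i : Int) 0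
  let a := if _hl : 2 * i + 1 < heap.length then min h (sm heap (2 * i + 1)) else h
  if _hr : 2 * i + 2 < heap.length then min a (sm heap (2 * i + 2)) else a
termination_by heap.length - i
decreasing_by all_goals omega

theorem sm_unfold (heap : List Int) (i : Nat) :
    sm heap i =
      (if 2 * i + 2 < heap.length then
         min (if 2 * i + 1 < heap.length then
                min (PySem.List.pyGetD heap (i : Int) 0) (sm heap (2 * i + 1))
              else PySem.List.pyGetD heap (i : Int) 0) (sm heap (2 * i + 2))
       else (if 2 * i + 1 < heap.length then
               min (PySem.List.pyGetD heap (i : Int) 0) (sm heap (2 * i + 1))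
             else PySem.List.pyGetD heap (i : Int) 0)) := by
  conv_lhs => rw [sm]
  split_ifs <;> rfl

-- A's loop returns true iff no parent/child comparison in the processed index list fails
theorem isMinHeapLoopA_eq_true_iff (heap : List Int) (n : Int) (l : List Int) :
    isMinHeapLoopA heap n l = true ↔
      ∀ i ∈ l, ¬(2 * i + 1 < n ∧ PySem.List.pyGetD heap i 0 > PySem.List.pyGetD heap (2 * i + 1) 0) ∧
               ¬(2 * i + 2 < n ∧ PySem.List.pyGetD heap i 0 > PySem.List.pyGetD heap (2 * i + 2) 0) := by
  induction l with
  | nil => simp [isMinHeapLoopA]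
  | cons i rest ih =>
    simp only [isMinHeapLoopA, List.mem_cons]
    split_ifs with h1 h2
    · exact iff_of_false (by simp) (fun H => (H i (Or.inl rfl)).1 h1)
    · exact iff_of_false (by simp) (fun H => (H i (Or.inl rfl)).2 h2)
    · rw [ih]
      constructor
      · rintro H j (rfl | hj)
        · exact ⟨h1, h2⟩
        · exact H j hj
      · intro H j hj; exact H j (Or.inr hj)

-- local heap property, as Nat-indexed statement
def LocalOk (heap : List Int) : Prop :=
  ∀ i : Nat, i < heap.length →
    (2 * i + 1 < heap.length → PySem.List.pyGetD heap (i : Int) 0 ≤ PySem.List.pyGetD heap ((2 * i + 1 : Nat) : Int) 0) ∧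
    (2 * i + 2 < heap.length → PySem.List.pyGetD heap (i : Int) 0 ≤ PySem.List.pyGetD heap ((2 * i + 2 : Nat) : Int) 0)

theorem a_true_iff_localOk (heap : List Int) : is_min_heap heap = true ↔ LocalOk heap := by
  unfold is_min_heap LocalOk
  rw [isMinHeapLoopA_eq_true_iff]
  constructor
  · intro H i hi
    have him : (i : Int) ∈ PySem.List.pyRange 0 (heap.length : Int) 1 := by
      rw [PySem.List.mem_pyRange_one]; constructor <;> [positivity; exact_mod_cast hi]
    have := H (i : Int) him
    constructor
    · intro hl
      by_contra hc
      exact this.1 ⟨by exact_mod_cast hl, by push_cast at hc ⊢; omega⟩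
    · intro hr
      by_contra hc
      exact this.2 ⟨by exact_mod_cast hr, by push_cast at hc ⊢; omega⟩
  · intro H i him
    rw [PySem.List.mem_pyRange_one] at him
    obtain ⟨h0, hn⟩ := him
    obtain ⟨iN, rfl⟩ := Int.eq_ofNat_of_zero_le h0
    have hiN : iN < heap.length := by exact_mod_cast hn
    have := H iN hiN
    constructor
    · rintro ⟨hl, hgt⟩
      have hlN : 2 * iN + 1 < heap.length := by exact_mod_cast hl
      have := this.1 hlN
      push_cast at this hgt
      omega
    · rintro ⟨hr, hgt⟩
      have hrN : 2 * iN + 2 < heap.length := by exact_mod_cast hr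
      have := this.2 hrN
      push_cast at this hgt
      omega

-- if the local property holds, every node already equals its subtree minimum
theorem sm_eq_of_localOk (heap : List Int) (L : LocalOk heap) (i : Nat) (hi : i < heap.length) :
    sm heap i = PySem.List.pyGetD heap (i : Int) 0 := by
  unfold sm
  have hL := L i hi
  by_cases hl : 2 * i + 1 < heap.length
  · have ihl := sm_eq_of_localOk heap L (2 * i + 1) hl
    by_cases hr : 2 * i + 2 < heap.length
    · have ihr := sm_eq_of_localOk heap L (2 * i + 2) hr
      simp only [hl, hr, dif_pos, ihl, ihr]
      rw [min_eq_left (hL.1 hl), min_eq_left (hL.2 hr)]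
    · simp only [hl, hr, dif_pos, dif_neg, ihl, not_false_iff]
      rw [min_eq_left (hL.1 hl)]
  · have hr : ¬ 2 * i + 2 < heap.length := by omega
    simp [hl, hr]
termination_by heap.length - i
decreasing_by all_goals omega

theorem sm_le_left (heap : List Int) (i : Nat) (hl : 2 * i + 1 < heap.length) :
    sm heap i ≤ sm heap (2 * i + 1) := by
  rw [sm_unfold heap i, if_pos hl]
  split_ifs with hr
  · exact le_trans (min_le_left _ _) (min_le_right _ _)
  · exact min_le_right _ _

theorem sm_le_right (heap : List Int) (i : Nat) (hr : 2 * i + 2 < heap.length) :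
    sm heap i ≤ sm heap (2 * i + 2) := by
  rw [sm_unfold heap i, if_pos hr]
  exact min_le_right _ _

-- conversely, if every node equals its subtree minimum the local property holds
theorem localOk_of_sm_eq (heap : List Int)
    (H : ∀ k : Nat, k < heap.length → sm heap k = PySem.List.pyGetD heap (k : Int) 0) :
    LocalOk heap := by
  intro i hi
  refine ⟨fun hl => ?_, fun hr => ?_⟩
  · calc PySem.List.pyGetD heap (i : Int) 0 = sm heap i := (H i hi).symm
      _ ≤ sm heap (2 * i + 1) := sm_le_left heap i hl
      _ = PySem.List.pyGetD heap ((2 * i + 1 : Nat) : Int) 0 := H _ hl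
  · calc PySem.List.pyGetD heap (i : Int) 0 = sm heap i := (H i hi).symm
      _ ≤ sm heap (2 * i + 2) := sm_le_right heap i hr
      _ = PySem.List.pyGetD heap ((2 * i + 2 : Nat) : Int) 0 := H _ hr

theorem bInner_length (n i : Int) (m : List Int) (c : Int) : (bInner n i m c).length = m.length := by
  unfold bInner; split_ifs <;> simp [PySem.List.length_pySetD]

-- one bInner application: entry j becomes min(m[j], m[c]) when c is in range, others untouched
theorem bInner_at (m : List Int) (j : Nat) (c : Int) (hj : j < m.length) (k : Nat) :
    PySem.List.pyGetD (bInner (m.length : Int) (j : Int) m c) (k : Int) 0 =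
      if k = j ∧ c < (m.length : Int) then
        min (PySem.List.pyGetD m (j : Int) 0) (PySem.List.pyGetD m c 0)
      else PySem.List.pyGetD m (k : Int) 0 := by
  unfold bInner
  split_ifs with h1 h2 h2
  · rw [PySem.List.pyGetD_pySetD_natCast m j k _ 0 hj]
    rw [if_pos h2.1, min_eq_right (le_of_lt h1.2)]
  · rw [PySem.List.pyGetD_pySetD_natCast m j k _ 0 hj,
        if_neg (fun hk => h2 ⟨hk, h1.1⟩)]
  · rw [h2.1]
    exact (min_eq_left (not_lt.mp fun hlt => h1 ⟨h2.2, hlt⟩)).symm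
  · rfl

theorem bLoop_length (n : Int) (l m : List Int) : (bLoop n m l).length = m.length := by
  induction l generalizing m with
  | nil => rfl
  | cons i rest ih =>
    simp only [bLoop, List.foldl, ih, bInner_length]

-- loop invariant: having processed indices n-1 … j, entries ≥ j hold subtree minima, entries < j are untouched
theorem bLoop_inv (heap : List Int) (j : Nat) (m : List Int)
    (hm : m.length = heap.length)
    (hinv : ∀ k : Nat, k < heap.length →
      PySem.List.pyGetD m (k : Int) 0 = if j ≤ k then sm heap k else PySem.List.pyGetD heap (k : Int) 0)
    (hj : j ≤ heap.length) :
    ∀ k : Nat, k < heap.length →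
      PySem.List.pyGetD (bLoop (heap.length : Int) m (PySem.List.pyRange ((j : Int) - 1) (-1) (-1))) (k : Int) 0
        = sm heap k := by
  induction j generalizing m with
  | zero =>
    intro k hk
    rw [PySem.List.pyRange_neg_one_eq_nil (by norm_num)]
    have := hinv k hk
    simpa using this
  | succ j ih =>
    intro k hk
    have hjlt : j < heap.length := by omega
    have hrw : ((j + 1 : Nat) : Int) - 1 = (j : Int) := by push_cast; ring
    rw [hrw, PySem.List.pyRange_neg_one_cons (by omega)]
    show PySem.List.pyGetD
        (bLoop _ ([2 * (j : Int) + 1, 2 * (j : Int) + 2].foldl (bInner _ (j : Int)) m)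
          (PySem.List.pyRange ((j : Int) - 1) (-1) (-1))) _ _ = _
    set ma := bInner (heap.length : Int) (j : Int) m (2 * (j : Int) + 1) with hma
    set mb := bInner (heap.length : Int) (j : Int) ma (2 * (j : Int) + 2) with hmb
    have hma_len : ma.length = heap.length := by rw [hma, bInner_length, hm]
    have hmb_len : mb.length = heap.length := by rw [hmb, bInner_length, hma_len]
    have hmj : PySem.List.pyGetD m (j : Int) 0 = PySem.List.pyGetD heap (j : Int) 0 := by
      rw [hinv j hjlt, if_neg (by omega)]
    -- entries of ma
    have hma_at : ∀ k : Nat, k < heap.length →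
        PySem.List.pyGetD ma (k : Int) 0 =
          if k = j then
            (if 2 * j + 1 < heap.length then
               min (PySem.List.pyGetD heap (j : Int) 0) (sm heap (2 * j + 1))
             else PySem.List.pyGetD heap (j : Int) 0)
          else PySem.List.pyGetD m (k : Int) 0 := by
      intro k hk
      by_cases hkj : k = j
      · subst hkj
        rw [if_pos rfl, hma, show (heap.length : Int) = (m.length : Int) by rw [hm],
            bInner_at m k _ (by rw [hm]; exact hk) k]
        by_cases hl : 2 * k + 1 < heap.length
        · have hA : PySem.List.pyGetD m (2 * (k : Int) + 1) 0 = sm heap (2 * k + 1) := by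
            rw [show (2 * (k : Int) + 1) = ((2 * k + 1 : Nat) : Int) by push_cast; ring,
                hinv (2 * k + 1) hl, if_pos (by omega)]
          rw [if_pos ⟨rfl, (by rw [hm]; exact_mod_cast hl : (2 * (k : Int) + 1) < (m.length : Int))⟩,
              hA, hmj, if_pos hl]
        · rw [if_neg (by rintro ⟨-, hc⟩; rw [hm] at hc; exact hl (by exact_mod_cast hc)),
              hmj, if_neg hl]
      · rw [if_neg hkj, hma, show (heap.length : Int) = (m.length : Int) by rw [hm],
            bInner_at m j _ (by rw [hm]; exact hjlt) k, if_neg (by rintro ⟨h, -⟩; exact hkj h)]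
    -- entries of mb: index j now holds sm heap j, everything else is as in m
    have hmb_at : ∀ k : Nat, k < heap.length →
        PySem.List.pyGetD mb (k : Int) 0 =
          if j ≤ k then (if k = j then sm heap k else PySem.List.pyGetD m (k : Int) 0)
          else PySem.List.pyGetD m (k : Int) 0 := by
      intro k hk
      by_cases hkj : k = j
      · subst hkj
        rw [if_pos (le_refl k), if_pos rfl, hmb,
            show (heap.length : Int) = (ma.length : Int) by rw [hma_len],
            bInner_at ma k _ (by rw [hma_len]; exact hk) k]
        have hAk : PySem.List.pyGetD ma (k : Int) 0 =
            (if 2 * k + 1 < heap.length then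
               min (PySem.List.pyGetD heap (k : Int) 0) (sm heap (2 * k + 1))
             else PySem.List.pyGetD heap (k : Int) 0) := by
          rw [hma_at k hk, if_pos rfl]
        by_cases hr : 2 * k + 2 < heap.length
        · have hB : PySem.List.pyGetD ma (2 * (k : Int) + 2) 0 = sm heap (2 * k + 2) := by
            rw [show (2 * (k : Int) + 2) = ((2 * k + 2 : Nat) : Int) by push_cast; ring,
                hma_at (2 * k + 2) hr, if_neg (by omega), hinv (2 * k + 2) hr, if_pos (by omega)]
          rw [if_pos ⟨rfl, (by rw [hma_len]; exact_mod_cast hr : (2 * (k : Int) + 2) < (ma.length : Int))⟩,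
              hAk, hB, sm_unfold heap k, if_pos hr]
        · rw [if_neg (by rintro ⟨-, hc⟩; rw [hma_len] at hc; exact hr (by exact_mod_cast hc)),
              hAk, sm_unfold heap k, if_neg hr]
      · rw [if_neg hkj, ite_self, hmb,
            show (heap.length : Int) = (ma.length : Int) by rw [hma_len],
            bInner_at ma j _ (by rw [hma_len]; exact hjlt) k, if_neg (by rintro ⟨h, -⟩; exact hkj h),
            hma_at k hk, if_neg hkj]
    -- apply the induction hypothesis to mb
    have := ih mb hmb_len (by
      intro k hk
      rw [hmb_at k hk]
      by_cases hkj : k = j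
      · subst hkj; rw [if_pos le_rfl, if_pos rfl, if_pos le_rfl]
      · by_cases h : j ≤ k
        · rw [if_pos h, if_neg hkj, hinv k hk, if_pos (by omega), if_pos h]
        · rw [if_neg h, if_neg h, hinv k hk, if_neg (by omega)]) (by omega) k hk
    -- the fold over the two-element child list is the two bInner applications
    simpa [List.foldl, hma, hmb] using this

-- B returns true iff every node equals its subtree minimum
theorem b_true_iff_sm_eq (heap : List Int) :
    is_min_heap_alt heap = true ↔
      ∀ k : Nat, k < heap.length → sm heap k = PySem.List.pyGetD heap (k : Int) 0 := by
  unfold is_min_heap_alt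
  rw [beq_iff_eq]
  have hlen : (bLoop (heap.length : Int) heap
      (PySem.List.pyRange ((heap.length : Int) - 1) (-1) (-1))).length = heap.length :=
    bLoop_length _ _ _
  have hfin := bLoop_inv heap heap.length heap rfl
    (by intro k hk; rw [if_neg (by omega)]) le_rfl
  constructor
  · intro hEq k hk
    have := hfin k hk
    rw [hEq] at this
    exact this.symm
  · intro H
    apply List.ext_getElem (by rw [hlen])
    intro k h1 h2
    have hbk := hfin k h2
    rw [PySem.List.pyGetD_natCast, List.getD_eq_getElem _ _ h1] at hbk
    have hhk := H k h2
    rw [PySem.List.pyGetD_natCast, List.getD_eq_getElem _ _ h2] at hhk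
    rw [hbk, hhk]

-- ===== VERDICT (by name: the statement is the Claim_ definition above) =====
theorem is_min_heap_spec : Claim_equal_is_min_heap := by
  intro heap _
  unfold Spec_is_min_heap
  rw [Bool.eq_iff_iff, a_true_iff_localOk, b_true_iff_sm_eq]
  constructor
  · exact fun L => sm_eq_of_localOk heap L
  · exact fun H => localOk_of_sm_eq heap H
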